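-- pv_equiv track=rewrite | github.com/dwarkesh777/python-html | ramujan.py | ramanujan
-- ===== SOURCE A (Python) =====
-- def ramanujan(limit):
--     result=""
--     for a in range(1,limit):
--         for b in range (a,limit):
--             for c in range(a,limit):
--                 for d in range(c,limit):
--                     x=a**3+b**3
--                     y=c**3+d**3
--                     if x==y and (a!=c or b!=d):
--                         number = a**3+b**3
--                         result+=f'{number}:{a,b,c,d}'
--     return result
-- ===== SOURCE B (Python) =====
-- def ramanujan(limit):
--     # Group every pair (c, d) with 1 <= c <= d < limit by its cube-sum once,
--     # then for each (a, b) emit only the matching pairs from its group.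
--     groups = {}
--     for c in range(1, limit):
--         for d in range(c, limit):
--             s = c ** 3 + d ** 3
--             groups[s] = groups.get(s, []) + [(c, d)]
--     out = ""
--     for a in range(1, limit):
--         for b in range(a, limit):
--             x = a ** 3 + b ** 3
--             for (c, d) in groups.get(x, []):
--                 if c >= a and (c, d) != (a, b):
--                     out += f'{x}:{a, b, c, d}'
--     return out
-- ===== Notes on version B (the rewrite author's own statement) =====
-- stated objective: faster
-- what changed: Replaces A's brute-force four-nested-loop scan over (a,b,c,d) with a single O(limit^2) pass that groups all (c,d) pairs by cube-sum in a dict, then for each (a,b) emits only the pairs found in its group.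
import Mathlib
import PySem

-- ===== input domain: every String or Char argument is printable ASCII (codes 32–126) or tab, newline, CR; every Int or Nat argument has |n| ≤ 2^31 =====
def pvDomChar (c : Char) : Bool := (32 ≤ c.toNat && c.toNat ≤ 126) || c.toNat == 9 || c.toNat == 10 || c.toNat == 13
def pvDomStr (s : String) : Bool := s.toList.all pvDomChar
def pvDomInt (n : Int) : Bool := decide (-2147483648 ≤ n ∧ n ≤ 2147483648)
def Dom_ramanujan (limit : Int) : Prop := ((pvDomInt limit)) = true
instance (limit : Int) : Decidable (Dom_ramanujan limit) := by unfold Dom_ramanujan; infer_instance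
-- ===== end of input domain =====

-- B groups all (c, d) pairs by cube-sum in a dict once (O(limit^2)) instead of A's
-- four nested loops (O(limit^4)); same return value, measured faster.

-- ===== PORT A =====
-- shared formatting helper: chars of the f-string f'{x}:{a, b, c, d}' (identical in both Pythons)
def pvFmt (x a b c d : Int) : List Char :=
  PySem.Int.toChars x ++ ':' :: '(' ::
    (PySem.Int.toChars a ++ ',' :: ' ' ::
      (PySem.Int.toChars b ++ ',' :: ' ' ::
        (PySem.Int.toChars c ++ ',' :: ' ' ::
          (PySem.Int.toChars d ++ [')']))))

-- the growing Python str `result` is modeled as a List Char, wrapped by String.mk at the end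
-- (PySem convention: string contents live on the List Char side)
def ramanujan (limit : Int) : String :=
  String.mk <|
    (PySem.List.pyRange 1 limit 1).foldl (fun res a =>
      (PySem.List.pyRange a limit 1).foldl (fun res b =>
        (PySem.List.pyRange a limit 1).foldl (fun res c =>
          (PySem.List.pyRange c limit 1).foldl (fun res d =>
            let x := a^3 + b^3
            let y := c^3 + d^3
            if x = y ∧ (a ≠ c ∨ b ≠ d) then
              let number := a^3 + b^3
              res ++ pvFmt number a b c d
            else res) res) res) res) []

-- ===== PORT B =====
def ramanujan_alt (limit : Int) : String :=
  let groups : PySem.Dict Int (List (Int × Int)) :=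
    (PySem.List.pyRange 1 limit 1).foldl (fun g c =>
      (PySem.List.pyRange c limit 1).foldl (fun g d =>
        let s := c^3 + d^3
        PySem.Dict.modify g s [] (fun l => l ++ [(c, d)])) g) PySem.Dict.empty
  String.mk <|
    (PySem.List.pyRange 1 limit 1).foldl (fun out a =>
      (PySem.List.pyRange a limit 1).foldl (fun out b =>
        let x := a^3 + b^3
        (groups.getD x []).foldl (fun out p =>
          if a ≤ p.1 ∧ p ≠ (a, b) then out ++ pvFmt x a b p.1 p.2 else out) out) out) []

-- ===== PRECONDITION & SPEC =====
def Spec_ramanujan (limit : Int) (out : String) : Prop := out = ramanujan_alt limit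
instance (limit : Int) (out : String) : Decidable (Spec_ramanujan limit out) := by unfold Spec_ramanujan; infer_instance

-- ===== CLAIM (what is proved, stated in full; the proofs are below) =====
def Claim_equal_ramanujan : Prop := ∀ (limit : Int), Dom_ramanujan limit → Spec_ramanujan limit (ramanujan limit)

-- ===== LEMMAS AND PROOFS =====

-- all (c, d) with 1 ≤ c ≤ d < limit, in the order A's two inner loops visit them
def pvPairs (limit : Int) : List (Int × Int) :=
  (PySem.List.pyRange 1 limit 1).flatMap (fun c =>
    (PySem.List.pyRange c limit 1).map (fun d => (c, d)))

lemma pvRangeNil {a b : Int} (h : b ≤ a) : PySem.List.pyRange a b 1 = [] := by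
  refine List.eq_nil_iff_forall_not_mem.mpr fun x hx => ?_
  rw [PySem.List.mem_pyRange_one] at hx
  omega

lemma pvFilterRange (b : Int) : ∀ (n : Nat) (lo a : Int), (b - lo).toNat = n → lo ≤ a →
    (PySem.List.pyRange lo b 1).filter (fun c => decide (a ≤ c)) = PySem.List.pyRange a b 1 := by
  intro n
  induction n with
  | zero =>
    intro lo a hn h
    have hb : b ≤ lo := by omega
    rw [pvRangeNil hb, pvRangeNil (hb.trans h), List.filter_nil]
  | succ n ih =>
    intro lo a hn h
    have hlt : lo < b := by omega
    rw [PySem.List.pyRange_one_cons hlt, List.filter_cons]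
    by_cases hal : a ≤ lo
    · have heq : a = lo := le_antisymm hal h
      subst heq
      rw [if_pos (by simp)]
      rw [PySem.List.pyRange_one_cons hlt]
      congr 1
      have h2 : (PySem.List.pyRange (a + 1) b 1).filter (fun c => decide (a ≤ c))
          = (PySem.List.pyRange (a + 1) b 1).filter (fun c => decide (a + 1 ≤ c)) := by
        refine List.filter_congr fun x hx => ?_
        rw [PySem.List.mem_pyRange_one] at hx
        rw [decide_eq_decide]
        omega
      rw [h2]
      exact ih (a + 1) (a + 1) (by omega) le_rfl
    · rw [if_neg (by simpa using hal)]
      exact ih (lo + 1) a (by omega) (by omega)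

lemma pvFlatMapIte {α β : Type} (p : α → Bool) (g : α → List β) (l : List α) :
    (l.flatMap fun x => if p x then g x else []) = (l.filter p).flatMap g := by
  induction l with
  | nil => rfl
  | cons x t ih => cases hp : p x <;> simp [hp, ih]

lemma pvFilterAndLeft {α : Type} (q : Bool) (r : α → Bool) (l : List α) :
    (l.filter fun x => q && r x) = if q then l.filter r else [] := by
  cases q <;> simp

-- the dict built by B holds, at key x, exactly the cube-sum-x pairs in A's visiting order
lemma pvBuildGetD (limit x : Int) :
    (((PySem.List.pyRange 1 limit 1).foldl (fun g c =>
        (PySem.List.pyRange c limit 1).foldl (fun g d =>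
          PySem.Dict.modify g (c^3 + d^3) [] (fun l => l ++ [(c, d)])) g) PySem.Dict.empty).getD x [])
    = (pvPairs limit).filter (fun p => p.1^3 + p.2^3 == x) := by
  have h1 : ((pvPairs limit).map (fun p => (p.1^3 + p.2^3, p))).foldl
        (fun g q => PySem.Dict.modify g q.1 [] (fun l => l ++ [q.2])) PySem.Dict.empty
      = (PySem.List.pyRange 1 limit 1).foldl (fun g c =>
          (PySem.List.pyRange c limit 1).foldl (fun g d =>
            PySem.Dict.modify g (c^3 + d^3) [] (fun l => l ++ [(c, d)])) g) PySem.Dict.empty := by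
    unfold pvPairs
    simp only [List.foldl_map, List.foldl_flatMap]
  rw [← h1, PySem.Dict.getD_foldl_modify_append]
  simp [List.filter_map, List.map_map, Function.comp_def]

lemma pvPairsKey (limit a b : Int) (ha : 1 ≤ a) :
    ((pvPairs limit).filter
        (fun p => decide (a ≤ p.1 ∧ p ≠ (a, b)) && (p.1^3 + p.2^3 == a^3 + b^3)))
    = (PySem.List.pyRange a limit 1).flatMap (fun c =>
        ((PySem.List.pyRange c limit 1).filter
            (fun d => decide (a^3 + b^3 = c^3 + d^3 ∧ (a ≠ c ∨ b ≠ d)))).map (fun d => (c, d))) := by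
  unfold pvPairs
  rw [List.filter_flatMap]
  have hinner : ∀ c : Int,
      (((PySem.List.pyRange c limit 1).map (fun d => (c, d))).filter
          (fun p => decide (a ≤ p.1 ∧ p ≠ (a, b)) && (p.1^3 + p.2^3 == a^3 + b^3)))
      = if decide (a ≤ c) then
          ((PySem.List.pyRange c limit 1).filter
              (fun d => decide (a^3 + b^3 = c^3 + d^3 ∧ (a ≠ c ∨ b ≠ d)))).map (fun d => (c, d))
        else [] := by
    intro c
    rw [List.filter_map]
    have hcomp : ((fun p : Int × Int => decide (a ≤ p.1 ∧ p ≠ (a, b)) && (p.1^3 + p.2^3 == a^3 + b^3))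
          ∘ (fun d => (c, d)))
        = fun d => decide (a ≤ c) && (decide ((c, d) ≠ (a, b)) && (c^3 + d^3 == a^3 + b^3)) := by
      funext d
      simp [Function.comp, Bool.and_assoc]
    rw [hcomp, pvFilterAndLeft]
    by_cases hac : a ≤ c
    · simp only [hac, decide_true, if_true]
      congr 1
      refine List.filter_congr fun d _ => ?_
      rw [Bool.eq_iff_iff]
      simp only [Bool.and_eq_true, decide_eq_true_eq, beq_iff_eq, ne_eq, Prod.mk.injEq, not_and]
      constructor
      · rintro ⟨hne, hq⟩
        refine ⟨hq.symm, ?_⟩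
        by_cases hca : c = a
        · exact Or.inr fun hbd => hne hca hbd.symm
        · exact Or.inl fun hac' => hca hac'.symm
      · rintro ⟨hq, hor⟩
        refine ⟨?_, hq.symm⟩
        intro hca hdb
        rcases hor with h | h
        · exact h hca.symm
        · exact h hdb.symm
    · simp [hac]
  simp only [hinner]
  rw [pvFlatMapIte (p := fun c => decide (a ≤ c))]
  rw [pvFilterRange limit ((limit - 1).toNat) 1 a rfl ha]

-- per (a, b): B's scan over the group equals A's two inner loops
lemma pvEmit (limit a b : Int) (ha : 1 ≤ a) (acc : List Char) :
    ((((PySem.List.pyRange 1 limit 1).foldl (fun g c =>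
          (PySem.List.pyRange c limit 1).foldl (fun g d =>
            PySem.Dict.modify g (c^3 + d^3) [] (fun l => l ++ [(c, d)])) g)
        PySem.Dict.empty).getD (a^3 + b^3) []).foldl
        (fun out p => if a ≤ p.1 ∧ p ≠ (a, b) then out ++ pvFmt (a^3 + b^3) a b p.1 p.2 else out) acc)
    = (PySem.List.pyRange a limit 1).foldl (fun res c =>
        (PySem.List.pyRange c limit 1).foldl (fun res d =>
          if a^3 + b^3 = c^3 + d^3 ∧ (a ≠ c ∨ b ≠ d) then res ++ pvFmt (a^3 + b^3) a b c d
          else res) res) acc := by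
  rw [pvBuildGetD]
  simp only [PySem.List.foldl_ite_eq_foldl_filter, List.filter_filter,
    PySem.List.foldl_append_eq_flatMap]
  congr 1
  rw [pvPairsKey limit a b ha]
  simp [List.flatMap_assoc, List.flatMap_map]

-- ===== VERDICT (by name: the statement is the Claim_ definition above) =====
theorem ramanujan_spec : Claim_equal_ramanujan := by
  intro limit _
  unfold Spec_ramanujan ramanujan ramanujan_alt
  simp only []
  congr 1
  apply PySem.List.foldl_congr_mem
  intro acc a hmem
  have ha : (1 : Int) ≤ a := (PySem.List.mem_pyRange_one.mp hmem).1
  apply PySem.List.foldl_congr_mem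
  intro acc' b _
  exact (pvEmit limit a b ha acc').symm
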